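-- pv_equiv track=rewrite | github.com/yagomilenio/yescrypt_task_cracker | generate_index.py | calcular_offsets
-- ===== SOURCE A (Python) =====
-- def calcular_offsets(lista, delimitador='\n'):
--     resultado = []
--     offset = 0
--
--     for elemento in lista:
--         longitud = len(elemento)
--         resultado.append((offset, longitud))
--         offset += longitud + len(delimitador)
--
--     return resultado
-- ===== SOURCE B (Python) =====
-- def calcular_offsets(lista, delimitador='\n'):
--     # Divide and conquer: compute each half's table independently (relative to
--     # offset 0), then shift the right half's table by the left half's total
--     # stride, read off the left table's final entry.
--     if not lista:
--         return []
--     if len(lista) == 1: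
--         return [(0, len(lista[0]))]
--     m = len(lista) // 2
--     izq = calcular_offsets(lista[:m], delimitador)
--     der = calcular_offsets(lista[m:], delimitador)
--     uo, ul = izq[-1]
--     s = uo + ul + len(delimitador)
--     return izq + [(o + s, l) for o, l in der]
-- ===== Notes on version B (the rewrite author's own statement) =====
-- stated objective: alternative
-- what changed: B replaces A's left-to-right running-offset accumulator loop by divide and conquer: it splits the list in half, computes each half's (offset,length) table independently relative to 0, and shifts the right table by the left half's total stride read off the left table's last entry.
import Mathlib
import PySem

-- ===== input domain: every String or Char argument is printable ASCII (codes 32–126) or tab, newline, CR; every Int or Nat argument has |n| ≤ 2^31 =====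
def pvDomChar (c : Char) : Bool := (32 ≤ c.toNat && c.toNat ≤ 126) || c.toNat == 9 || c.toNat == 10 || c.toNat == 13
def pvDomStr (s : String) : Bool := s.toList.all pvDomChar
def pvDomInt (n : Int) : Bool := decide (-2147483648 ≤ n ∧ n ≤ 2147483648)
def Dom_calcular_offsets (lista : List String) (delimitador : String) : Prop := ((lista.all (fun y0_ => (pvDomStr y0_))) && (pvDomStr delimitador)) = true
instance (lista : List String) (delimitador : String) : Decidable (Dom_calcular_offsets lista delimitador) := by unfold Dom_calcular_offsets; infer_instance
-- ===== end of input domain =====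

-- ===== PORT A =====
-- B replaces A's running-offset loop by divide and conquer: each half's table is
-- computed relative to 0 and the right half is shifted (objective: alternative).
def calcular_offsets (lista : List String) (delimitador : String) : List (Int × Int) :=
  (lista.foldl (fun (st : List (Int × Int) × Int) elemento =>
      let longitud : Int := PySem.Str.len elemento
      (st.1 ++ [(st.2, longitud)], st.2 + (longitud + PySem.Str.len delimitador)))
    ([], 0)).1

-- ===== PORT B =====
-- izq[-1] is ported as pyGetD izq (-1) (0,0): izq is nonempty on that branch
-- (m ≥ 1), so the default is never used and this matches Python's izq[-1] exactly.
def calcular_offsets_alt (lista : List String) (delimitador : String) : List (Int × Int) :=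
  if h0 : lista = [] then []
  else if h1 : lista.length = 1 then [(0, PySem.Str.len (lista.headD ""))]
  else
    let m : Nat := lista.length / 2
    let izq := calcular_offsets_alt (PySem.List.slice lista none (some (m : Int))) delimitador
    let der := calcular_offsets_alt (PySem.List.slice lista (some (m : Int)) none) delimitador
    let u := PySem.List.pyGetD izq (-1) ((0 : Int), (0 : Int))
    let s := u.1 + u.2 + PySem.Str.len delimitador
    izq ++ der.map (fun q => (q.1 + s, q.2))
  termination_by lista.length
  decreasing_by
  · rw [PySem.List.slice_to_natCast]
    have hp : 0 < lista.length := List.length_pos_of_ne_nil h0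
    simp only [List.length_take]
    omega
  · rw [PySem.List.slice_from_natCast]
    have hp : 0 < lista.length := List.length_pos_of_ne_nil h0
    simp only [List.length_drop]
    omega

-- ===== PRECONDITION & SPEC =====
def Spec_calcular_offsets (lista : List String) (delimitador : String) (out : List (Int × Int)) : Prop := out = calcular_offsets_alt lista delimitador
instance (lista : List String) (delimitador : String) (out : List (Int × Int)) : Decidable (Spec_calcular_offsets lista delimitador out) := by unfold Spec_calcular_offsets; infer_instance

-- ===== CLAIM =====
def Claim_equal_calcular_offsets : Prop := ∀ (lista : List String) (delimitador : String), Dom_calcular_offsets lista delimitador → Spec_calcular_offsets lista delimitador (calcular_offsets lista delimitador)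

-- ===== LEMMAS AND PROOFS =====

-- reference form of the result: pairs with explicit running offset
def pvRefPairs (d off : Int) (ls : List String) : List (Int × Int) :=
  match ls with
  | [] => []
  | x :: t => (off, PySem.Str.len x) :: pvRefPairs d (off + (PySem.Str.len x + d)) t

-- total stride of a block of elements
def pvStride (d : Int) (ls : List String) : Int :=
  (ls.map (fun x => PySem.Str.len x + d)).sum

theorem pvA_fold (delimitador : String) (lista : List String)
    (acc : List (Int × Int)) (off : Int) :
    (lista.foldl (fun (st : List (Int × Int) × Int) elemento =>
        let longitud : Int := PySem.Str.len elemento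
        (st.1 ++ [(st.2, longitud)], st.2 + (longitud + PySem.Str.len delimitador)))
      (acc, off)).1 = acc ++ pvRefPairs (PySem.Str.len delimitador) off lista := by
  induction lista generalizing acc off with
  | nil => simp [pvRefPairs]
  | cons x t ih =>
    simp only [List.foldl_cons]
    rw [ih]
    simp [pvRefPairs]

theorem pvRef_shift (d : Int) (ls : List String) (off s : Int) :
    (pvRefPairs d off ls).map (fun p => (p.1 + s, p.2)) = pvRefPairs d (off + s) ls := by
  induction ls generalizing off with
  | nil => simp [pvRefPairs]
  | cons x t ih =>
    simp only [pvRefPairs, List.map_cons, ih]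
    ring_nf

theorem pvRef_append (d : Int) (l1 l2 : List String) (off : Int) :
    pvRefPairs d off (l1 ++ l2)
      = pvRefPairs d off l1 ++ pvRefPairs d (off + pvStride d l1) l2 := by
  induction l1 generalizing off with
  | nil => simp [pvRefPairs, pvStride]
  | cons x t ih =>
    simp only [List.cons_append, pvRefPairs, ih, pvStride, List.map_cons, List.sum_cons]
    ring_nf

theorem pvGetD_last (ys : List (Int × Int)) (x : Int × Int) :
    PySem.List.pyGetD (ys ++ [x]) (-1) ((0 : Int), (0 : Int)) = x := by
  simp [PySem.List.pyGetD, PySem.List.pyGet?, PySem.List.pyIdx?]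

theorem pvRef_concat_last (d : Int) (ls : List String) (off : Int) (h : ls ≠ []) :
    ∃ ys u, pvRefPairs d off ls = ys ++ [u] ∧ u.1 + u.2 + d = off + pvStride d ls := by
  induction ls generalizing off with
  | nil => exact absurd rfl h
  | cons x t ih =>
    cases t with
    | nil =>
      refine ⟨[], (off, PySem.Str.len x), by simp [pvRefPairs], ?_⟩
      simp [pvStride]; ring
    | cons y u =>
      obtain ⟨ys, w, hEq, hSum⟩ := ih (off + (PySem.Str.len x + d)) (by simp)
      refine ⟨(off, PySem.Str.len x) :: ys, w, ?_, ?_⟩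
      · show (off, PySem.Str.len x) :: pvRefPairs d (off + (PySem.Str.len x + d)) (y :: u) = _
        rw [hEq]
        simp
      rw [hSum]
      simp [pvStride]
      ring

theorem pvB_eq (delimitador : String) (n : Nat) :
    ∀ (lista : List String), lista.length ≤ n →
      calcular_offsets_alt lista delimitador
        = pvRefPairs (PySem.Str.len delimitador) 0 lista := by
  induction n with
  | zero =>
    intro lista h
    have : lista = [] := List.eq_nil_of_length_eq_zero (Nat.le_zero.mp h)
    subst this
    rw [calcular_offsets_alt]
    simp [pvRefPairs]
  | succ n ih =>
    intro lista h
    rw [calcular_offsets_alt]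
    by_cases h0 : lista = []
    · simp [h0, pvRefPairs]
    · simp only [h0]
      by_cases h1 : lista.length = 1
      · obtain ⟨x, hx⟩ : ∃ x, lista = [x] := by
          cases lista with
          | nil => exact absurd rfl h0
          | cons a t =>
            cases t with
            | nil => exact ⟨a, rfl⟩
            | cons b u => simp at h1
        subst hx
        simp [pvRefPairs]
      · simp only [h1, dif_neg, not_false_iff]
        rw [PySem.List.slice_to_natCast, PySem.List.slice_from_natCast]
        have hlen : 2 ≤ lista.length := by
          have hp : 0 < lista.length := List.length_pos_of_ne_nil h0
          omega
        set m : Nat := lista.length / 2 with hm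
        have hm1 : 1 ≤ m := by omega
        have hmL : m < lista.length := by omega
        have htake : (lista.take m).length ≤ n := by
          simp only [List.length_take]; omega
        have hdrop : (lista.drop m).length ≤ n := by
          simp only [List.length_drop]; omega
        rw [ih _ htake, ih _ hdrop]
        have hne : lista.take m ≠ [] := by
          have hlt : (lista.take m).length = m := by
            rw [List.length_take]; omega
          intro hc
          rw [hc] at hlt
          simp at hlt
          omega
        obtain ⟨ys, u, hEq, hSum⟩ :=
          pvRef_concat_last (PySem.Str.len delimitador) (lista.take m) 0 hne
        rw [hEq, pvGetD_last, ← hEq, pvRef_shift, hSum]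
        simp only [zero_add]
        have hsplit := pvRef_append (PySem.Str.len delimitador) (lista.take m) (lista.drop m) 0
        rw [List.take_append_drop] at hsplit
        simp only [zero_add] at hsplit
        exact hsplit.symm

-- ===== VERDICT =====
theorem calcular_offsets_spec : Claim_equal_calcular_offsets := by
  intro lista delimitador _
  unfold Spec_calcular_offsets calcular_offsets
  rw [pvA_fold, pvB_eq delimitador lista.length lista (le_refl _)]
  simp
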